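-- pv_equiv track=rewrite | github.com/vitcoding/video-generation-by-context | b_roll/b_roll_generation/broll_image_generation.py | _contains_humans
-- ===== SOURCE A (Python) =====
-- def _contains_humans(text: str) -> bool:
--     """Heuristic check whether the prompt likely includes people."""
--     if not text:
--         return False
--     t = text.lower()
--     human_keywords = [
--         "person",
--         "people",
--         "man",
--         "woman",
--         "men",
--         "women",
--         "adult",
--         "team",
--         "group",
--         "crowd",
--         "colleague",
--         "coworker",
--         "employees",
--         "worker",
--         "business team",
--         "audience",
--         "speaker",
--         "meeting",
--         "office team",
--         "portrait",
--         "headshot",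
--         "couple",
--         "family",
--     ]
--     return any(k in t for k in human_keywords)
-- ===== SOURCE B (Python) =====
-- # Keywords indexed once by their first character: at each scan position only
-- # the keywords that can possibly start there are tested.
-- _BY_FIRST = {
--     "p": ["person", "people", "portrait"],
--     "m": ["man", "men", "meeting"],
--     "w": ["woman", "women", "worker"],
--     "a": ["adult", "audience"],
--     "t": ["team"],
--     "g": ["group"],
--     "c": ["crowd", "colleague", "coworker", "couple"],
--     "e": ["employees"],
--     "b": ["business team"],
--     "s": ["speaker"],
--     "o": ["office team"],
--     "h": ["headshot"],
--     "f": ["family"],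
-- }
--
--
-- def _contains_humans(text: str) -> bool:
--     """One left-to-right scan with first-character dispatch."""
--     t = text.lower()
--     for i, c in enumerate(t):
--         for k in _BY_FIRST.get(c, ()):
--             if t.startswith(k, i):
--                 return True
--     return False
-- ===== Notes on version B (the rewrite author's own statement) =====
-- stated objective: alternative
-- what changed: A runs an independent whole-text substring search per keyword; B precomputes a dict indexing the keywords by first character and makes one left-to-right scan over text positions, testing at each position only the keywords dispatched by the current character.
import Mathlib
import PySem

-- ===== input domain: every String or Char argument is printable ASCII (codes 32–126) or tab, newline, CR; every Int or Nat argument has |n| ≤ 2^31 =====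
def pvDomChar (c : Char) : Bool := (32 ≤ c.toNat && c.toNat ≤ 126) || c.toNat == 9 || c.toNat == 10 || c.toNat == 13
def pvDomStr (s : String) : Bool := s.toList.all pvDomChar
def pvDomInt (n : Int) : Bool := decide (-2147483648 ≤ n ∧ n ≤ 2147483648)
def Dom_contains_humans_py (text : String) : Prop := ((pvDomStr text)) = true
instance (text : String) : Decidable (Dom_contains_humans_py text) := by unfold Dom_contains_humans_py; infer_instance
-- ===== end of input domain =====

-- B replaces A's per-keyword whole-text substring loop with a single left-to-right
-- scan dispatching on the current character through a precomputed first-letter index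
-- (objective: alternative algorithm/data structure; same results).

-- ===== PORT A =====
def pvHumanKeywords : List String :=
  ["person", "people", "man", "woman", "men", "women", "adult", "team",
   "group", "crowd", "colleague", "coworker", "employees", "worker",
   "business team", "audience", "speaker", "meeting", "office team",
   "portrait", "headshot", "couple", "family"]

def contains_humans_py (text : String) : Bool :=
  if text = "" then false
  else
    let t := PySem.Str.lower text
    pvHumanKeywords.any (fun k => PySem.Str.isIn k t)

-- ===== PORT B =====
-- Python's dict literal keyed by one-character strings; keys ported as Char
-- (the scanned character c is a Char in Lean).
def pvByFirst : PySem.Dict Char (List String) :=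
  PySem.Dict.ofList
    [('p', ["person", "people", "portrait"]),
     ('m', ["man", "men", "meeting"]),
     ('w', ["woman", "women", "worker"]),
     ('a', ["adult", "audience"]),
     ('t', ["team"]),
     ('g', ["group"]),
     ('c', ["crowd", "colleague", "coworker", "couple"]),
     ('e', ["employees"]),
     ('b', ["business team"]),
     ('s', ["speaker"]),
     ('o', ["office team"]),
     ('h', ["headshot"]),
     ('f', ["family"])]

-- the scan loop: `for i, c in enumerate(t): for k in _BY_FIRST.get(c, ()): if t.startswith(k, i)`;
-- t.startswith(k, i) is exactly "k is a prefix of the current suffix", so the loop is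
-- a structural recursion over the suffixes of t.
def pvScan : List Char → Bool
  | [] => false
  | c :: rest =>
      ((pvByFirst.getD c []).any (fun k => PySem.Chars.startswith (c :: rest) k.toList))
        || pvScan rest

def contains_humans_py_alt (text : String) : Bool :=
  pvScan (PySem.Str.lower text).toList

-- ===== PRECONDITION & SPEC =====
def Spec_contains_humans_py (text : String) (out : Bool) : Prop := out = contains_humans_py_alt text
instance (text : String) (out : Bool) : Decidable (Spec_contains_humans_py text out) := by unfold Spec_contains_humans_py; infer_instance

-- ===== CLAIM (what is proved, stated in full; the proofs are below) =====
def Claim_equal_contains_humans_py : Prop := ∀ (text : String), Dom_contains_humans_py text → Spec_contains_humans_py text (contains_humans_py text)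

-- ===== LEMMAS AND PROOFS =====

theorem byFirst_sub (c : Char) (k : String) (hk : k ∈ pvByFirst.getD c []) :
    k ∈ pvHumanKeywords := by
  rcases hg : pvByFirst.get? c with _ | v
  · rw [PySem.Dict.getD_of_get?_eq_none _ _ hg] at hk
    cases hk
  · have hv : v ∈ pvByFirst.values := by
      have hi := PySem.Dict.mem_items_of_get?_eq_some _ hg
      simp only [PySem.Dict.values]
      exact List.mem_map.mpr ⟨(c, v), hi, rfl⟩
    rw [PySem.Dict.getD_of_get?_eq_some _ _ hg] at hk
    have hall : ∀ v ∈ pvByFirst.values, ∀ k ∈ v, k ∈ pvHumanKeywords := by decide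
    exact hall v hv k hk

theorem byFirst_complete (k : String) (hk : k ∈ pvHumanKeywords) (c : Char)
    (hh : k.toList.head? = some c) : k ∈ pvByFirst.getD c [] := by
  fin_cases hk <;> (injection hh with h; subst h; decide)

theorem keywords_nonnil : ∀ k ∈ pvHumanKeywords, k.toList ≠ [] := by decide

theorem dispatch (c : Char) (rest : List Char) :
    (pvByFirst.getD c []).any (fun k => PySem.Chars.startswith (c :: rest) k.toList)
      = pvHumanKeywords.any (fun k => PySem.Chars.startswith (c :: rest) k.toList) := by
  rw [Bool.eq_iff_iff]
  simp only [List.any_eq_true, PySem.Chars.startswith_iff]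
  constructor
  · rintro ⟨k, hk, hp⟩
    exact ⟨k, byFirst_sub c k hk, hp⟩
  · rintro ⟨k, hk, hp⟩
    have hh : k.toList.head? = some c := by
      cases hkl : k.toList with
      | nil => exact absurd hkl (keywords_nonnil k hk)
      | cons a t =>
          rw [hkl] at hp
          obtain ⟨h1, _⟩ := List.cons_prefix_cons.mp hp
          simp [h1]
    exact ⟨k, byFirst_complete k hk c hh, hp⟩

theorem scan_eq (s : List Char) :
    pvScan s = pvHumanKeywords.any (fun k => PySem.Chars.isIn k.toList s) := by
  induction s with
  | nil => decide
  | cons c rest ih =>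
      simp only [pvScan, dispatch, ih]
      rw [Bool.eq_iff_iff]
      simp only [Bool.or_eq_true, List.any_eq_true, PySem.Chars.startswith_iff,
        PySem.Chars.isIn_iff_infix, List.infix_cons_iff]
      constructor
      · rintro (⟨k, hk, hp⟩ | ⟨k, hk, hp⟩)
        · exact ⟨k, hk, Or.inl hp⟩
        · exact ⟨k, hk, Or.inr hp⟩
      · rintro ⟨k, hk, hp | hp⟩
        · exact Or.inl ⟨k, hk, hp⟩
        · exact Or.inr ⟨k, hk, hp⟩

-- ===== VERDICT (by name: the statement is the Claim_ definition above) =====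
theorem contains_humans_py_spec : Claim_equal_contains_humans_py := by
  intro text _
  unfold Spec_contains_humans_py
  by_cases h : text = ""
  · subst h; decide
  · unfold contains_humans_py contains_humans_py_alt
    rw [if_neg h, scan_eq]
    simp [PySem.Str.isIn_eq]
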